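-- pv_equiv track=rewrite | github.com/Tamizh019/Data-Talk | backend/app/core/visualizer.py | _pick_best_metric_col
-- ===== SOURCE A (Python) =====
-- def _pick_best_metric_col(numeric_cols: list[str]) -> str:
--     """
--     Intelligently picks the best Y-axis column, skipping ID-like columns
--     and preferring meaningful metric names.
--     """
--     # Columns that are almost certainly NOT useful to chart
--     ID_PATTERNS = {"id", "_id", "pk", "uuid", "key", "index", "seq", "no", "num", "number", "serial"}
--
--     # Preferred column name fragments — these are likely meaningful metrics
--     PREFERRED_PATTERNS = {
--         "cgpa", "gpa", "score", "grade", "mark", "point",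
--         "salary", "wage", "pay", "income", "revenue", "amount", "price", "cost", "fee",
--         "count", "total", "sum", "avg", "average", "mean", "rate", "percent", "ratio",
--         "age", "year", "month", "day", "hour", "quantity", "qty", "stock", "inventory",
--         "height", "weight", "distance", "duration", "size", "capacity", "population",
--     }
--
--     # First pass: look for a preferred metric name (partial match)
--     for col in numeric_cols:
--         col_lower = col.lower()
--         if any(p in col_lower for p in PREFERRED_PATTERNS):
--             return col
--
--     # Second pass: skip ID-like columns, return the first non-ID numeric col
--     for col in numeric_cols:
--         col_lower = col.lower()
--         if not any(col_lower == p or col_lower.endswith("_" + p) for p in ID_PATTERNS):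
--             return col
--
--     # Fallback: just return the first numeric col (not ideal, but better than crashing)
--     return numeric_cols[0]
-- ===== SOURCE B (Python) =====
-- def _pick_best_metric_col(numeric_cols: list[str]) -> str:
--     ID_PATTERNS = {"id", "_id", "pk", "uuid", "key", "index", "seq", "no", "num", "number", "serial"}
--     PREFERRED_PATTERNS = {
--         "cgpa", "gpa", "score", "grade", "mark", "point",
--         "salary", "wage", "pay", "income", "revenue", "amount", "price", "cost", "fee",
--         "count", "total", "sum", "avg", "average", "mean", "rate", "percent", "ratio",
--         "age", "year", "month", "day", "hour", "quantity", "qty", "stock", "inventory",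
--         "height", "weight", "distance", "duration", "size", "capacity", "population",
--     }
--     preferred = None
--     non_id = None
--     for col in numeric_cols:
--         low = col.lower()
--         if preferred is None and any(p in low for p in PREFERRED_PATTERNS):
--             preferred = col
--         if non_id is None and not any(low == p or low.endswith("_" + p) for p in ID_PATTERNS):
--             non_id = col
--     if preferred is not None:
--         return preferred
--     if non_id is not None:
--         return non_id
--     return numeric_cols[0]
-- ===== Notes on version B (the rewrite author's own statement) =====
-- stated objective: alternative
-- what changed: Replaces A's two sequential early-return scans over numeric_cols with a single pass that maintains two Optional candidates (first preferred-named column, first non-ID-like column) and decides after the loop.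
import Mathlib
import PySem

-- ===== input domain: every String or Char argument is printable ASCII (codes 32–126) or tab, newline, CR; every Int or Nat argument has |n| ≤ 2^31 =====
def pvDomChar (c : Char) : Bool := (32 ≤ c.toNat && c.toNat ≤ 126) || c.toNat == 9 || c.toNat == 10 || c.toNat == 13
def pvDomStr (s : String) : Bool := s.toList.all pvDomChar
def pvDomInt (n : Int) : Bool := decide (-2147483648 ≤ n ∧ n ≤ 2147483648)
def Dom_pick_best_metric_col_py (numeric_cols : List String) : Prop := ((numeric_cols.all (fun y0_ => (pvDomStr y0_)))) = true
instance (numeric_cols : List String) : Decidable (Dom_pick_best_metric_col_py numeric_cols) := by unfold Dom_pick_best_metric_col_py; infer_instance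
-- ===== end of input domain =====

-- B replaces A's two sequential early-return scans with one pass keeping two Optional candidates (alternative decomposition, same cost).

-- ===== PORT A =====
-- The two pattern sets of the Python module (set iteration order is irrelevant here: only `any` is taken over them).
def pvIdPatterns : List String :=
  ["id", "_id", "pk", "uuid", "key", "index", "seq", "no", "num", "number", "serial"]

def pvPreferredPatterns : List String :=
  ["cgpa", "gpa", "score", "grade", "mark", "point",
   "salary", "wage", "pay", "income", "revenue", "amount", "price", "cost", "fee",
   "count", "total", "sum", "avg", "average", "mean", "rate", "percent", "ratio",
   "age", "year", "month", "day", "hour", "quantity", "qty", "stock", "inventory",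
   "height", "weight", "distance", "duration", "size", "capacity", "population"]

-- `any(p in col_lower for p in PREFERRED_PATTERNS)`
def pvIsPreferred (col : String) : Bool :=
  pvPreferredPatterns.any (fun p => PySem.Str.isIn p (PySem.Str.lower col))

-- `any(col_lower == p or col_lower.endswith("_" + p) for p in ID_PATTERNS)`
def pvIsIdLike (col : String) : Bool :=
  pvIdPatterns.any (fun p =>
    PySem.Str.lower col == p || PySem.Str.endswith (PySem.Str.lower col) ("_" ++ p))

-- first pass of A: early return on the first preferred column
def pvPassPreferred : List String → Option String
  | [] => none
  | col :: rest => if pvIsPreferred col then some col else pvPassPreferred rest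

-- second pass of A: early return on the first non-ID column
def pvPassNonId : List String → Option String
  | [] => none
  | col :: rest => if !pvIsIdLike col then some col else pvPassNonId rest

def pick_best_metric_col_py (numeric_cols : List String) : String :=
  match pvPassPreferred numeric_cols with
  | some col => col
  | none =>
    match pvPassNonId numeric_cols with
    | some col => col
    | none => (PySem.List.pyGet? numeric_cols 0).getD ""  -- numeric_cols[0]; Pre_ excludes the IndexError

-- ===== PORT B =====
-- single fold over numeric_cols maintaining (preferred?, non_id?), set only on first qualification
def pvScanStep (st : Option String × Option String) (col : String) : Option String × Option String :=
  let pref := if st.1.isNone ∧ pvIsPreferred col then some col else st.1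
  let nonid := if st.2.isNone ∧ !pvIsIdLike col then some col else st.2
  (pref, nonid)

def pick_best_metric_col_py_alt (numeric_cols : List String) : String :=
  let st := numeric_cols.foldl pvScanStep (none, none)
  match st.1 with
  | some col => col
  | none =>
    match st.2 with
    | some col => col
    | none => (PySem.List.pyGet? numeric_cols 0).getD ""  -- numeric_cols[0]; Pre_ excludes the IndexError

-- ===== PRECONDITION & SPEC =====
-- A raises IndexError on the empty list (numeric_cols[0] in the fallback); B does too.
def Pre_pick_best_metric_col_py (numeric_cols : List String) : Prop := numeric_cols ≠ []
instance (numeric_cols : List String) : Decidable (Pre_pick_best_metric_col_py numeric_cols) := by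
  unfold Pre_pick_best_metric_col_py; infer_instance

def pvWitness_pick_best_metric_col_py : List String := ["user_id", "score"]

def Spec_pick_best_metric_col_py (numeric_cols : List String) (out : String) : Prop := out = pick_best_metric_col_py_alt numeric_cols
instance (numeric_cols : List String) (out : String) : Decidable (Spec_pick_best_metric_col_py numeric_cols out) := by unfold Spec_pick_best_metric_col_py; infer_instance

-- ===== CLAIM (what is proved, stated in full; the proofs are below) =====
def Claim_equal_pick_best_metric_col_py : Prop := ∀ (numeric_cols : List String), Dom_pick_best_metric_col_py numeric_cols → Pre_pick_best_metric_col_py numeric_cols → Spec_pick_best_metric_col_py numeric_cols (pick_best_metric_col_py numeric_cols)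

-- ===== LEMMAS AND PROOFS =====

-- the fold's first component: the initial candidate if set, else the first preferred column
theorem pvScan_fst (cols : List String) (st : Option String × Option String) :
    (cols.foldl pvScanStep st).1 = match st.1 with
      | some c => some c
      | none => pvPassPreferred cols := by
  induction cols generalizing st with
  | nil => cases h : st.1 <;> simp [h, pvPassPreferred]
  | cons col rest ih =>
    simp only [List.foldl_cons, ih, pvScanStep, pvPassPreferred]
    cases h : st.1 <;> by_cases hp : pvIsPreferred col = true <;> simp [h, hp]

-- the fold's second component: the initial candidate if set, else the first non-ID column
theorem pvScan_snd (cols : List String) (st : Option String × Option String) :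
    (cols.foldl pvScanStep st).2 = match st.2 with
      | some c => some c
      | none => pvPassNonId cols := by
  induction cols generalizing st with
  | nil => cases h : st.2 <;> simp [h, pvPassNonId]
  | cons col rest ih =>
    simp only [List.foldl_cons, ih, pvScanStep, pvPassNonId]
    cases h : st.2 <;> by_cases hp : pvIsIdLike col = true <;> simp [h, hp]

-- ===== VERDICT (by name: the statement is the Claim_ definition above) =====
theorem pick_best_metric_col_py_spec : Claim_equal_pick_best_metric_col_py := by
  intro numeric_cols _ _
  unfold Spec_pick_best_metric_col_py pick_best_metric_col_py pick_best_metric_col_py_alt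
  simp only [pvScan_fst, pvScan_snd]
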